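-- pv_equiv track=rewrite | github.com/Vedanjalee/Py_CODE | wonderful_substring.py | wonderfulstring
-- ===== SOURCE A (Python) =====
-- def wonderfulstring(s):
--     char_count = {}
--
--     left = 0
--     result = 0
--
--     for right in range(len(s)):
--
--         while s[right] in char_count and char_count[s[right]]>0:
--             char_count[s[left]] -= 1
--             left += 1
--
--         result += (right - left+1)
--
--         if s[right] in char_count :
--             char_count[s[right]] += 1
--
--         else:
--             char_count[s[right]]    = 1
--     return result
-- ===== SOURCE B (Python) =====
-- def wonderfulstring(s):
--     last_seen = {}
--     left = 0
--     result = 0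
--     for right in range(len(s)):
--         c = s[right]
--         if c in last_seen and last_seen[c] >= left:
--             left = last_seen[c] + 1
--         last_seen[c] = right
--         result += right - left + 1
--     return result
-- ===== Notes on version B (the rewrite author's own statement) =====
-- stated objective: idiomatic
-- what changed: Replaces the character-count dict and the inner while-loop that shrinks the window one character at a time with a last-occurrence index map: left jumps directly past the stale position, so the loop body is straight-line.
import Mathlib
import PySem

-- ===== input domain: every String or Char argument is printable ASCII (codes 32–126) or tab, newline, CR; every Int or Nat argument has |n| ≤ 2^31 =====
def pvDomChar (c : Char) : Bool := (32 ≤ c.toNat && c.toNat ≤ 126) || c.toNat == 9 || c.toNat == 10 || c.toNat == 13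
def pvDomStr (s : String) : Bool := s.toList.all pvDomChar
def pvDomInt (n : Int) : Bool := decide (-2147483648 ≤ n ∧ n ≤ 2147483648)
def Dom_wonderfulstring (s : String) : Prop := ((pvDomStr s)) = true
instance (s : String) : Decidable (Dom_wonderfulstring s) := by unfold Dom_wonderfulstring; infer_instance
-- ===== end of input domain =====

-- B replaces A's count dict + inner shrink-while-loop with a last-occurrence index map and a
-- straight-line loop body (idiomatic sliding window); same return value, proved below.

-- ===== PORT A =====
-- the inner 'while s[right] in char_count and char_count[s[right]]>0' loop; fuel is only a
-- totality guard (the loop runs at most right - left ≤ right times, so fuel = right+1 given at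
-- the call site is never exhausted on a real trace; wsWhile_spec below proves this).
-- 's[left]' is l.getD left ' ' (left is always in range on a real trace);
-- 'char_count[s[left]] -= 1' is Dict.modify with default 0 (the key is always present on a real trace).
def wsWhile (l : List Char) (cr : Char) : Nat → PySem.Dict Char Int → Nat → PySem.Dict Char Int × Nat
  | 0, cc, left => (cc, left)
  | fuel+1, cc, left =>
    if cc.contains cr = true ∧ cc.getD cr 0 > 0 then
      wsWhile l cr fuel (cc.modify (l.getD left ' ') 0 (· - 1)) (left+1)
    else (cc, left)

-- the 'for right in range(len(s))' loop: r is the index of the head of the remaining suffix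
def wsLoopA (l : List Char) : List Char → Nat → PySem.Dict Char Int → Nat → Int → Int
  | [], _, _, _, res => res
  | c :: rest, r, cc, left, res =>
    let p := wsWhile l c (r+1) cc left
    let res' := res + ((r : Int) - (p.2 : Int) + 1)
    let cc' := if p.1.contains c = true then p.1.modify c 0 (· + 1) else p.1.insert c 1
    wsLoopA l rest (r+1) cc' p.2 res'

def wonderfulstring (s : String) : Int :=
  wsLoopA s.toList s.toList 0 PySem.Dict.empty 0 0

-- ===== PORT B =====
-- 'if c in last_seen and last_seen[c] >= left: left = last_seen[c] + 1', then
-- 'last_seen[c] = right; result += right - left + 1'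
def wsLoopB : List Char → Nat → PySem.Dict Char Nat → Nat → Int → Int
  | [], _, _, _, res => res
  | c :: rest, r, ls, left, res =>
    let left' := if ls.contains c = true ∧ left ≤ ls.getD c 0 then ls.getD c 0 + 1 else left
    wsLoopB rest (r+1) (ls.insert c r) left' (res + ((r : Int) - (left' : Int) + 1))

def wonderfulstring_alt (s : String) : Int :=
  wsLoopB s.toList 0 PySem.Dict.empty 0 0

-- ===== PRECONDITION & SPEC =====
def Spec_wonderfulstring (s : String) (out : Int) : Prop := out = wonderfulstring_alt s
instance (s : String) (out : Int) : Decidable (Spec_wonderfulstring s out) := by unfold Spec_wonderfulstring; infer_instance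

-- ===== CLAIM (what is proved, stated in full; the proofs are below) =====
def Claim_equal_wonderfulstring : Prop := ∀ (s : String), Dom_wonderfulstring s → Spec_wonderfulstring s (wonderfulstring s)

-- ===== LEMMAS AND PROOFS =====

-- index of the last occurrence of c in m (none if absent); proof-only helper
def lastOcc? : List Char → Char → Option Nat
  | [], _ => none
  | a :: m, c =>
    match lastOcc? m c with
    | some j => some (j+1)
    | none => if a = c then some 0 else none

-- the value of 'left' after both A's while loop and B's if, as a function of lastOcc?
def newLeft (pre : List Char) (c : Char) (left : Nat) : Nat :=
  match lastOcc? pre c with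
  | some j => if left ≤ j then j + 1 else left
  | none => left

theorem newLeft_some {pre : List Char} {c : Char} {j : Nat} (left : Nat)
    (h : lastOcc? pre c = some j) :
    newLeft pre c left = if left ≤ j then j + 1 else left := by
  unfold newLeft; rw [h]

theorem newLeft_none {pre : List Char} {c : Char} (left : Nat)
    (h : lastOcc? pre c = none) : newLeft pre c left = left := by
  unfold newLeft; rw [h]

theorem lastOcc_none {m : List Char} {c : Char} : lastOcc? m c = none ↔ c ∉ m := by
  induction m with
  | nil => simp [lastOcc?]
  | cons a m ih =>
    simp only [lastOcc?]
    cases h : lastOcc? m c with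
    | some j =>
      have hc : c ∈ m := by
        by_contra hc
        rw [ih.mpr hc] at h; cases h
      simp [hc]
    | none =>
      have hm : c ∉ m := ih.mp h
      split_ifs with hac
      · subst hac; simp
      · simp [hm]
        exact fun h => hac h.symm
theorem lastOcc_get {m : List Char} {c : Char} {j : Nat} (h : lastOcc? m c = some j) :
    ∃ hj : j < m.length, m[j] = c := by
  induction m generalizing j with
  | nil => simp [lastOcc?] at h
  | cons a m ih =>
    simp only [lastOcc?] at h
    cases hm : lastOcc? m c with
    | some j' =>
      rw [hm] at h
      obtain rfl : j = j' + 1 := by simpa using h.symm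
      obtain ⟨hlt, hget⟩ := ih hm
      exact ⟨by simpa using Nat.succ_lt_succ hlt, by simpa using hget⟩
    | none =>
      rw [hm] at h
      split_ifs at h with hac
      obtain rfl : j = 0 := by simpa using h.symm
      exact ⟨by simp, by simpa using hac⟩

theorem lastOcc_lt {m : List Char} {c : Char} {j : Nat} (h : lastOcc? m c = some j) :
    j < m.length := by
  obtain ⟨hj, _⟩ := lastOcc_get h; exact hj

theorem lastOcc_last {m : List Char} {c : Char} {j : Nat} (h : lastOcc? m c = some j) :
    c ∉ m.drop (j+1) := by
  induction m generalizing j with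
  | nil => simp [lastOcc?] at h
  | cons a m ih =>
    simp only [lastOcc?] at h
    cases hm : lastOcc? m c with
    | some j' =>
      rw [hm] at h
      obtain rfl : j = j' + 1 := by simpa using h.symm
      simpa using ih hm
    | none =>
      rw [hm] at h
      split_ifs at h with hac
      obtain rfl : j = 0 := by simpa using h.symm
      simpa using lastOcc_none.mp hm

theorem lastOcc_append {pre : List Char} {c c' : Char} :
    lastOcc? (pre ++ [c']) c = if c = c' then some pre.length else lastOcc? pre c := by
  induction pre with
  | nil =>
    by_cases h : c = c'
    · subst h; simp [lastOcc?]
    · simp [lastOcc?, h]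
      exact fun hh => absurd hh.symm h
  | cons a pre ih =>
    by_cases h : c = c'
    · subst h; simp [lastOcc?, List.cons_append, ih]
    · simp [lastOcc?, List.cons_append, ih, h]

-- c ∈ the window m[left:] iff its last occurrence is ≥ left
theorem mem_drop_iff_lastOcc {m : List Char} {c : Char} {left : Nat} :
    c ∈ m.drop left ↔ ∃ j, lastOcc? m c = some j ∧ left ≤ j := by
  constructor
  · intro hmem
    have hcm : c ∈ m := List.drop_subset _ _ hmem
    cases hoc : lastOcc? m c with
    | none => exact absurd hcm (lastOcc_none.mp hoc)
    | some j =>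
      refine ⟨j, rfl, ?_⟩
      by_contra hlt
      push_neg at hlt
      have hsub : m.drop left = (m.drop (j+1)).drop (left - (j+1)) := by
        rw [List.drop_drop]; congr 1; omega
      have : c ∈ m.drop (j+1) := by
        rw [hsub] at hmem
        exact List.drop_subset _ _ hmem
      exact lastOcc_last hoc this
  · rintro ⟨j, hoc, hle⟩
    obtain ⟨hj, hget⟩ := lastOcc_get hoc
    have hlen : j - left < (m.drop left).length := by
      simp only [List.length_drop]; omega
    have : (m.drop left)[j - left] = c := by
      rw [List.getElem_drop]
      have : left + (j - left) = j := by omega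
      simp_rw [this]; exact hget
    rw [← this]
    exact List.getElem_mem hlen

theorem not_mem_drop_newLeft {pre : List Char} {c : Char} {left : Nat} :
    c ∉ pre.drop (newLeft pre c left) := by
  cases hoc : lastOcc? pre c with
  | none =>
    rw [newLeft_none left hoc]
    exact fun hm => (lastOcc_none.mp hoc) (List.drop_subset _ _ hm)
  | some j =>
    rw [newLeft_some left hoc]
    split_ifs with hle
    · exact lastOcc_last hoc
    · intro hm
      obtain ⟨j', hoc', hle'⟩ := mem_drop_iff_lastOcc.mp hm
      rw [hoc] at hoc'
      obtain rfl : j' = j := by simpa using hoc'.symm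
      exact hle hle'

theorem newLeft_le {pre : List Char} {c : Char} {left : Nat} (h : left ≤ pre.length) :
    newLeft pre c left ≤ pre.length := by
  cases hoc : lastOcc? pre c with
  | none => rw [newLeft_none left hoc]; exact h
  | some j =>
    rw [newLeft_some left hoc]
    have := lastOcc_lt hoc
    split_ifs <;> omega

theorem left_le_newLeft {pre : List Char} {c : Char} {left : Nat} :
    left ≤ newLeft pre c left := by
  cases hoc : lastOcc? pre c with
  | none => rw [newLeft_none left hoc]
  | some j => rw [newLeft_some left hoc]; split_ifs <;> omega

-- the while loop: under the invariants it lands exactly at newLeft and keeps the invariants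
theorem wsWhile_spec :
    ∀ (fuel : Nat) (l pre : List Char) (c : Char) (cc : PySem.Dict Char Int) (left : Nat),
    pre <+: l → left ≤ pre.length → pre.length < left + fuel →
    (∀ x, cc.getD x 0 = ((pre.drop left).count x : Int)) →
    (∀ x, cc.contains x = decide (x ∈ pre)) →
    (pre.drop left).Nodup →
    (wsWhile l c fuel cc left).2 = newLeft pre c left ∧
    (∀ x, (wsWhile l c fuel cc left).1.getD x 0 =
        ((pre.drop (newLeft pre c left)).count x : Int)) ∧
    (∀ x, (wsWhile l c fuel cc left).1.contains x = decide (x ∈ pre)) := by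
  intro fuel
  induction fuel with
  | zero => intro l pre c cc left hpre h1 hfuel h2 h3 h4; omega
  | succ fuel ih =>
    intro l pre c cc left hpre h1 hfuel h2 h3 h4
    simp only [wsWhile]
    by_cases hC : c ∈ pre.drop left
    · -- condition true: shrink one step
      have hcp : c ∈ pre := List.drop_subset _ _ hC
      have hcount : 0 < (pre.drop left).count c := List.count_pos_iff.mpr hC
      have hcond : cc.contains c = true ∧ cc.getD c 0 > 0 := by
        refine ⟨by rw [h3]; simpa using hcp, by rw [h2]; exact_mod_cast hcount⟩
      rw [if_pos hcond]
      have hlt : left < pre.length := by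
        by_contra hge
        push_neg at hge
        rw [List.drop_eq_nil_of_le hge] at hC
        cases hC
      have ha : l.getD left ' ' = pre[left] := by
        obtain ⟨t, rfl⟩ := hpre
        simp [List.getD_eq_getElem?_getD, List.getElem?_append_left hlt,
          List.getElem?_eq_getElem hlt]
      have hwin : pre.drop left = pre[left] :: pre.drop (left + 1) :=
        List.drop_eq_getElem_cons hlt
      have h2' : ∀ x, (cc.modify (l.getD left ' ') 0 (· - 1)).getD x 0 =
          ((pre.drop (left + 1)).count x : Int) := by
        intro x
        rw [ha, PySem.Dict.getD_modify]
        split_ifs with hx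
        · subst hx
          rw [h2, hwin, List.count_cons_self]
          push_cast; ring
        · rw [h2, hwin]
          have hx' : pre[left] ≠ x := fun h => hx h.symm
          rw [List.count_cons_of_ne hx']
      have h3' : ∀ x, (cc.modify (l.getD left ' ') 0 (· - 1)).contains x =
          decide (x ∈ pre) := by
        intro x
        rw [ha, PySem.Dict.contains_modify, h3]
        by_cases hx : x = pre[left]
        · subst hx
          simp [List.getElem_mem hlt]
        · simp [hx]
      have h4' : (pre.drop (left + 1)).Nodup := by
        rw [hwin] at h4
        exact h4.of_cons
      have hres := ih l pre c _ (left + 1) hpre hlt (by omega) h2' h3' h4'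
      -- newLeft is the same one step in
      have hNL : newLeft pre c left = newLeft pre c (left + 1) := by
        obtain ⟨j, hoc, hle⟩ := mem_drop_iff_lastOcc.mp hC
        rw [newLeft_some left hoc, newLeft_some (left + 1) hoc]
        split_ifs <;> omega
      rw [hNL]
      exact hres
    · -- condition false: loop exits, left stays
      have hcond : ¬(cc.contains c = true ∧ cc.getD c 0 > 0) := by
        rintro ⟨hc1, hc2⟩
        rw [h2] at hc2
        have : 0 < (pre.drop left).count c := by exact_mod_cast hc2
        exact hC (List.count_pos_iff.mp this)
      rw [if_neg hcond]
      have hNL : newLeft pre c left = left := by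
        cases hoc : lastOcc? pre c with
        | none => exact newLeft_none left hoc
        | some j =>
          rw [newLeft_some left hoc]
          split_ifs with hle
          · exact absurd (mem_drop_iff_lastOcc.mpr ⟨j, hoc, hle⟩) hC
          · rfl
      rw [hNL]
      exact ⟨rfl, fun x => h2 x, fun x => h3 x⟩

-- the two main loops agree under the joint invariant
theorem loop_eq (l : List Char) :
    ∀ (rest pre : List Char) (cc : PySem.Dict Char Int) (ls : PySem.Dict Char Nat)
      (left : Nat) (res : Int),
    pre ++ rest = l → left ≤ pre.length →
    (∀ x, cc.getD x 0 = ((pre.drop left).count x : Int)) →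
    (∀ x, cc.contains x = decide (x ∈ pre)) →
    (pre.drop left).Nodup →
    (∀ x, ls.get? x = lastOcc? pre x) →
    wsLoopA l rest pre.length cc left res = wsLoopB rest pre.length ls left res := by
  intro rest
  induction rest with
  | nil => intro pre cc ls left res _ _ _ _ _ _; simp [wsLoopA, wsLoopB]
  | cons c rest ih =>
    intro pre cc ls left res hl h1 h2 h3 h4 h5
    simp only [wsLoopA, wsLoopB]
    have hpre : pre <+: l := ⟨c :: rest, hl⟩
    obtain ⟨hw2, hwD, hwK⟩ :=
      wsWhile_spec (pre.length + 1) l pre c cc left hpre h1 (by omega) h2 h3 h4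
    -- B computes the same new left
    have hBleft : (if ls.contains c = true ∧ left ≤ ls.getD c 0
        then ls.getD c 0 + 1 else left) = newLeft pre c left := by
      have hk := h5 c
      cases hoc : lastOcc? pre c with
      | none =>
        rw [hoc] at hk
        have : ls.contains c = false := by
          rw [PySem.Dict.contains_eq_isSome_get?, hk]; rfl
        rw [newLeft_none left hoc]
        simp [this]
      | some j =>
        rw [hoc] at hk
        have hcon : ls.contains c = true := by
          rw [PySem.Dict.contains_eq_isSome_get?, hk]; rfl
        have hgd : ls.getD c 0 = j := by
          rw [PySem.Dict.getD_eq_get?_getD, hk]; rfl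
        rw [newLeft_some left hoc]
        simp only [hcon, hgd, true_and]
    set left' := newLeft pre c left with hL
    have h1' : left' ≤ pre.length := newLeft_le h1
    have hll : left ≤ left' := left_le_newLeft
    have hwin' : (pre ++ [c]).drop left' = pre.drop left' ++ [c] :=
      List.drop_append_of_le_length h1'
    have hnd' : (pre.drop left').Nodup := by
      have : pre.drop left' = (pre.drop left).drop (left' - left) := by
        rw [List.drop_drop]; congr 1; omega
      rw [this]
      exact h4.sublist (List.drop_sublist _ _)
    have hnc : c ∉ pre.drop left' := not_mem_drop_newLeft
    rw [hBleft, hw2]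
    have hcall := ih (pre ++ [c])
      (if (wsWhile l c (pre.length + 1) cc left).1.contains c = true
        then (wsWhile l c (pre.length + 1) cc left).1.modify c 0 (· + 1)
        else (wsWhile l c (pre.length + 1) cc left).1.insert c 1)
      (ls.insert c pre.length) left'
      (res + ((pre.length : Int) - (left' : Int) + 1))
      (by simpa using hl)
      (by simp; omega)
      ?_ ?_ ?_ ?_
    · simpa using hcall
    · -- counts after the end-of-body dict update
      intro x
      rw [hwin']
      split_ifs with hcc
      · rw [PySem.Dict.getD_modify]
        split_ifs with hx
        · subst hx; rw [hwD]; simp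
        · rw [hwD]
          simp [List.count_append, List.count_singleton, hx]
          intro hxc
          exact absurd hxc.symm hx
      · have hcp : c ∉ pre := by
          have hthis := hwK c
          have hccf : (wsWhile l c (pre.length + 1) cc left).1.contains c = false := by
            simpa using hcc
          rw [hccf] at hthis
          simpa using hthis.symm
        have hc0 : (pre.drop left').count c = 0 :=
          List.count_eq_zero.mpr (fun hm => hcp (List.drop_subset _ _ hm))
        rw [PySem.Dict.getD_insert]
        split_ifs with hx
        · subst hx; simp [List.count_append, hc0]
        · rw [hwD]
          simp [List.count_append, List.count_singleton, hx]
          intro hxc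
          exact absurd hxc.symm hx
    · intro x
      split_ifs with hcc
      · rw [PySem.Dict.contains_modify, hwK]
        by_cases hx : x = c <;> simp [hx]
      · rw [PySem.Dict.contains_insert, hwK]
        by_cases hx : x = c <;> simp [hx]
    · rw [hwin']
      simp [List.nodup_append, hnd']
      exact fun a ha hac => hnc (hac ▸ ha)
    · intro x
      rw [PySem.Dict.get?_insert, lastOcc_append, h5]

-- ===== VERDICT (by name: the statement is the Claim_ definition above) =====
theorem wonderfulstring_spec : Claim_equal_wonderfulstring := by
  intro s _
  unfold Spec_wonderfulstring wonderfulstring wonderfulstring_alt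
  exact loop_eq s.toList s.toList [] PySem.Dict.empty PySem.Dict.empty 0 0 rfl
    (by simp) (by simp) (by simp) (by simp) (by intro x; simp [lastOcc?])
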